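-- pv_equiv track=rewrite | github.com/softnanolab/boileroom | boileroom/models/esm/linker.py | _tokenize_raw_sequence
-- ===== SOURCE A (Python) =====
-- def _tokenize_raw_sequence(sequence: str) -> list[tuple[str, ...]]:
--     chains: list[tuple[str, ...]] = []
--     current_chain: list[str] = []
--     index = 0
--
--     while index < len(sequence):
--         if sequence.startswith("<mask>", index):
--             current_chain.append("<mask>")
--             index += len("<mask>")
--             continue
--
--         token = sequence[index]
--         if token == ":":
--             if not current_chain:
--                 raise ValueError(f"Invalid multimer sequence {sequence!r}: empty chain near ':'.")
--             chains.append(tuple(current_chain))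
--             current_chain = []
--             index += 1
--             continue
--
--         current_chain.append(token)
--         index += 1
--
--     if not current_chain:
--         raise ValueError(f"Invalid multimer sequence {sequence!r}: empty chain near ':'.")
--
--     chains.append(tuple(current_chain))
--     return chains
-- ===== SOURCE B (Python) =====
-- def _tokenize_raw_sequence(sequence: str) -> list[tuple[str, ...]]:
--     chains: list[tuple[str, ...]] = []
--     for chain in sequence.split(":"):
--         if not chain:
--             raise ValueError(f"Invalid multimer sequence {sequence!r}: empty chain near ':'.")
--         parts = chain.split("<mask>")
--         tokens: list[str] = list(parts[0])
--         for part in parts[1:]: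
--             tokens.append("<mask>")
--             tokens.extend(part)
--         chains.append(tuple(tokens))
--     return chains
-- ===== Notes on version B (the rewrite author's own statement) =====
-- stated objective: simpler
-- what changed: Replaced the manual index-scanning while-loop with startswith checks by split(':') over chains and split('<mask>') within each chain, interleaving the mask tokens back; no index arithmetic remains.
import Mathlib
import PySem

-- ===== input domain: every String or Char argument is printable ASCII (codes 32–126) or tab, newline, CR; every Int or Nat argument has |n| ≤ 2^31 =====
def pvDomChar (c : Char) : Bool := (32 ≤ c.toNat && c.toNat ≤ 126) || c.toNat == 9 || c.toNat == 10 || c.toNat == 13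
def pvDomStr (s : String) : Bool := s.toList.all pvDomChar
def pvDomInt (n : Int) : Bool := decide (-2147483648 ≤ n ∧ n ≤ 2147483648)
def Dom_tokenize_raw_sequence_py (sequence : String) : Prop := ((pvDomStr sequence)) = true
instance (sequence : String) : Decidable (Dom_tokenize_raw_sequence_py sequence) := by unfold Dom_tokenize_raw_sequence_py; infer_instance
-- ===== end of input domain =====

-- B replaces A's manual index-scanning while-loop by a split-on-':' / split-on-"<mask>" decomposition (objective: simpler).


-- ===== PORT A =====
-- A's while-loop: state = (remaining chars, current_chain, chains); the raise paths (excluded by Pre_) return [].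
def pvTokA (cs : List Char) (current : List String) (chains : List (List String)) : List (List String) :=
  if h : ['<','m','a','s','k','>'].isPrefixOf cs then
    pvTokA (cs.drop 6) (current ++ ["<mask>"]) chains
  else
    match cs with
    | [] => if current = [] then [] else chains ++ [current]
    | c :: rest =>
      if c = ':' then
        if current = [] then [] else pvTokA rest [] (chains ++ [current])
      else pvTokA rest (current ++ [String.mk [c]]) chains
termination_by cs.length
decreasing_by
  · have h6 := (List.isPrefixOf_iff_prefix.mp h).length_le
    simp at h6 ⊢; omega
  · simp
  · simp

def tokenize_raw_sequence_py (sequence : String) : List (List String) :=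
  pvTokA sequence.toList [] []

-- ===== PORT B =====
def pvSingle (c : Char) : String := String.mk [c]

-- Source B's per-chain tokenizer: split on "<mask>", chars of parts[0], then for each later part a "<mask>" token plus its chars.
def pvChainTok (chain : List Char) : List String :=
  match PySem.Chars.splitOn chain ['<','m','a','s','k','>'] with
  | [] => []
  | p :: rest => rest.foldl (fun t part => (t ++ ["<mask>"]) ++ part.map pvSingle) (p.map pvSingle)

-- Source B raises (excluded by Pre_) when a chunk is empty; that path returns [].
def tokenize_raw_sequence_py_alt (sequence : String) : List (List String) :=
  let chunks := PySem.Chars.splitOn sequence.toList [':']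
  if chunks.any (· = []) then [] else chunks.map pvChainTok

-- ===== PRECONDITION & SPEC =====
-- Pre_ excludes exactly the inputs on which A raises ValueError (some ':'-separated chunk of the sequence is empty); B raises the same error there.
def Pre_tokenize_raw_sequence_py (sequence : String) : Prop :=
  ∀ p ∈ PySem.Chars.splitOn sequence.toList [':'], p ≠ []
instance (sequence : String) : Decidable (Pre_tokenize_raw_sequence_py sequence) := by
  unfold Pre_tokenize_raw_sequence_py; infer_instance

def pvWitness_tokenize_raw_sequence_py : String := "AC<mask>D:EF"

def Spec_tokenize_raw_sequence_py (sequence : String) (out : List (List String)) : Prop := out = tokenize_raw_sequence_py_alt sequence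
instance (sequence : String) (out : List (List String)) : Decidable (Spec_tokenize_raw_sequence_py sequence out) := by unfold Spec_tokenize_raw_sequence_py; infer_instance

-- ===== CLAIM (what is proved, stated in full; the proofs are below) =====
def Claim_equal_tokenize_raw_sequence_py : Prop := ∀ (sequence : String), Dom_tokenize_raw_sequence_py sequence → Pre_tokenize_raw_sequence_py sequence → Spec_tokenize_raw_sequence_py sequence (tokenize_raw_sequence_py sequence)

-- ===== LEMMAS AND PROOFS =====
def pvSplitC : List Char → List (List Char)
  | [] => [[]]
  | c :: rest =>
    if c = ':' then [] :: pvSplitC rest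
    else
      match pvSplitC rest with
      | [] => [[c]]
      | p :: ps => (c :: p) :: ps

def pvSplitM (cs : List Char) : List (List Char) :=
  if h : ['<','m','a','s','k','>'].isPrefixOf cs then [] :: pvSplitM (cs.drop 6)
  else
    match cs with
    | [] => [[]]
    | c :: rest =>
      match pvSplitM rest with
      | [] => [[c]]
      | p :: ps => (c :: p) :: ps
termination_by cs.length
decreasing_by
  · have h6 := (List.isPrefixOf_iff_prefix.mp h).length_le
    simp at h6 ⊢; omega
  · simp

def pvTokOf (cs : List Char) : List String :=
  if h : ['<','m','a','s','k','>'].isPrefixOf cs then "<mask>" :: pvTokOf (cs.drop 6)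
  else
    match cs with
    | [] => []
    | c :: rest => pvSingle c :: pvTokOf rest
termination_by cs.length
decreasing_by
  · have h6 := (List.isPrefixOf_iff_prefix.mp h).length_le
    simp at h6 ⊢; omega
  · simp

def pvG : List (List Char) → List String
  | [] => []
  | p :: ps => ("<mask>" :: p.map pvSingle) ++ pvG ps

theorem pvSplitC_ne_nil (cs : List Char) : pvSplitC cs ≠ [] := by
  induction cs with
  | nil => simp [pvSplitC]
  | cons c rest ih =>
    simp only [pvSplitC]
    split
    · simp
    · split <;> simp

theorem pv_goC (fuel : Nat) : ∀ (cs cur : List Char) (acc : List (List Char)), cs.length < fuel →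
    PySem.Chars.splitOn.go [':'] fuel cs cur acc =
      acc.reverse ++ ((cur.reverse ++ (pvSplitC cs).headI) :: (pvSplitC cs).tail) := by
  induction fuel with
  | zero => intro cs cur acc h; omega
  | succ fuel ih =>
    intro cs cur acc h
    match cs with
    | [] =>
      rw [PySem.Chars.splitOn.go]
      · simp [pvSplitC]
      · simp
    | c :: rest =>
      rw [PySem.Chars.splitOn.go]
      by_cases hc : c = ':'
      · subst hc
        have hp : [':'].isPrefixOf (':' :: rest) = true := by simp [List.isPrefixOf]
        rw [if_pos hp]
        simp only [List.length_cons, List.drop_succ_cons, List.length_nil, List.drop_zero]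
        rw [ih rest [] (cur.reverse :: acc) (by simpa using Nat.lt_of_succ_lt_succ h)]
        rcases hsp : pvSplitC rest with _ | ⟨p, ps⟩
        · exact absurd hsp (pvSplitC_ne_nil rest)
        · simp [pvSplitC, hsp]
      · have hp : [':'].isPrefixOf (c :: rest) = false := by
          simp only [List.isPrefixOf, Bool.and_eq_false_iff]
          left
          exact beq_eq_false_iff_ne.mpr (fun hco => hc hco.symm)
        rw [if_neg (by simp [hp])]
        rw [ih rest (c :: cur) acc (by simpa using Nat.lt_of_succ_lt_succ h)]
        simp only [pvSplitC, if_neg hc]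
        rcases hsp : pvSplitC rest with _ | ⟨p, ps⟩
        · exact absurd hsp (pvSplitC_ne_nil rest)
        · simp

theorem pvSplitM_ne_nil (cs : List Char) : pvSplitM cs ≠ [] := by
  rw [pvSplitM]
  split
  · simp
  · split
    · simp
    · split <;> simp

theorem pv_goM (fuel : Nat) : ∀ (cs cur : List Char) (acc : List (List Char)), cs.length < fuel →
    PySem.Chars.splitOn.go ['<','m','a','s','k','>'] fuel cs cur acc =
      acc.reverse ++ ((cur.reverse ++ (pvSplitM cs).headI) :: (pvSplitM cs).tail) := by
  induction fuel with
  | zero => intro cs cur acc h; omega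
  | succ fuel ih =>
    intro cs cur acc h
    match cs with
    | [] =>
      rw [PySem.Chars.splitOn.go]
      · rw [pvSplitM]; simp [List.isPrefixOf]
      · simp
    | c :: rest =>
      rw [PySem.Chars.splitOn.go]
      by_cases hp : ['<','m','a','s','k','>'].isPrefixOf (c :: rest)
      · rw [if_pos hp]
        have h6 : 6 ≤ (c :: rest).length := by
          simpa using (List.isPrefixOf_iff_prefix.mp hp).length_le
        have hlen : ((c :: rest).drop 6).length < fuel := by
          simp at h ⊢; omega
        have hR : pvSplitM (c :: rest) = [] :: pvSplitM ((c :: rest).drop 6) := by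
          rw [pvSplitM, dif_pos hp]
        rw [show List.drop ['<','m','a','s','k','>'].length (c :: rest) = List.drop 6 (c :: rest) by rfl]
        rw [ih _ [] (cur.reverse :: acc) hlen, hR]
        rcases hsp : pvSplitM ((c :: rest).drop 6) with _ | ⟨p, ps⟩
        · exact absurd hsp (pvSplitM_ne_nil _)
        · simp [hsp]
      · rw [if_neg (by simp [hp])]
        rcases hsp : pvSplitM rest with _ | ⟨p, ps⟩
        · exact absurd hsp (pvSplitM_ne_nil rest)
        · have hR : pvSplitM (c :: rest) = (c :: p) :: ps := by
            rw [pvSplitM, dif_neg hp]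
            simp [hsp]
          rw [ih rest (c :: cur) acc (by simpa using Nat.lt_of_succ_lt_succ h), hsp, hR]
          simp

theorem pv_splitOn_colon (cs : List Char) : PySem.Chars.splitOn cs [':'] = pvSplitC cs := by
  rw [PySem.Chars.splitOn, pv_goC (cs.length + 1) cs [] [] (by omega)]
  rcases hsp : pvSplitC cs with _ | ⟨p, ps⟩
  · exact absurd hsp (pvSplitC_ne_nil cs)
  · simp

theorem pv_splitOn_mask (cs : List Char) :
    PySem.Chars.splitOn cs ['<','m','a','s','k','>'] = pvSplitM cs := by
  rw [PySem.Chars.splitOn, pv_goM (cs.length + 1) cs [] [] (by omega)]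
  rcases hsp : pvSplitM cs with _ | ⟨p, ps⟩
  · exact absurd hsp (pvSplitM_ne_nil cs)
  · simp

theorem pv_foldTok (rest : List (List Char)) : ∀ (init : List String),
    rest.foldl (fun t part => (t ++ ["<mask>"]) ++ part.map pvSingle) init = init ++ pvG rest := by
  induction rest with
  | nil => intro init; simp [pvG]
  | cons p ps ih => intro init; rw [List.foldl_cons, ih]; simp [pvG]

theorem pv_join_eq (cs : List Char) :
    (match pvSplitM cs with
     | [] => []
     | p :: rest => p.map pvSingle ++ pvG rest) = pvTokOf cs := by
  induction cs using pvSplitM.induct with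
  | case1 cs h ih =>
    rw [pvSplitM, dif_pos h, pvTokOf, dif_pos h]
    rcases hsp : pvSplitM (cs.drop 6) with _ | ⟨p, ps⟩
    · exact absurd hsp (pvSplitM_ne_nil _)
    · rw [hsp] at ih
      simp [pvG, ← ih]
  | case2 h =>
    rw [pvSplitM, dif_neg h, pvTokOf, dif_neg h]
    rfl
  | case3 c rest h hnil ih =>
    exact absurd hnil (pvSplitM_ne_nil rest)
  | case4 c rest h p ps hsp ih =>
    rw [pvSplitM, dif_neg h, pvTokOf, dif_neg h]
    rw [hsp] at ih
    simp [hsp, ← ih]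

theorem pv_chainTok_eq (cs : List Char) : pvChainTok cs = pvTokOf cs := by
  rw [pvChainTok]
  rw [show PySem.Chars.splitOn cs ['<','m','a','s','k','>'] = pvSplitM cs from pv_splitOn_mask cs]
  rw [← pv_join_eq cs]
  rcases hsp : pvSplitM cs with _ | ⟨p, ps⟩
  · rfl
  · dsimp only
    rw [pv_foldTok]

theorem pvSplitC_head_prefix (cs : List Char) : (pvSplitC cs).headI <+: cs := by
  induction cs with
  | nil => simp [pvSplitC]
  | cons c rest ih =>
    simp only [pvSplitC]
    split
    · simp
    · rcases hsp : pvSplitC rest with _ | ⟨p, ps⟩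
      · exact absurd hsp (pvSplitC_ne_nil rest)
      · rw [hsp] at ih
        simpa using ih

theorem pvSplitC_nocolon_append (pre : List Char) (rest : List Char) (h : ∀ c ∈ pre, c ≠ ':') :
    pvSplitC (pre ++ rest) = (pre ++ (pvSplitC rest).headI) :: (pvSplitC rest).tail := by
  induction pre with
  | nil =>
    rcases hsp : pvSplitC rest with _ | ⟨p, ps⟩
    · exact absurd hsp (pvSplitC_ne_nil rest)
    · simp [hsp]
  | cons c pre ih =>
    have hc : c ≠ ':' := h c (by simp)
    simp only [List.cons_append, pvSplitC, if_neg hc]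
    rw [ih (fun d hd => h d (by simp [hd]))]

theorem pvTokOf_mask (cs : List Char) (h : ['<','m','a','s','k','>'].isPrefixOf cs = true) :
    pvTokOf cs = "<mask>" :: pvTokOf (cs.drop 6) := by
  rw [pvTokOf, dif_pos h]

theorem pvTokOf_char (c : Char) (rest : List Char)
    (h : ¬ ['<','m','a','s','k','>'].isPrefixOf (c :: rest) = true) :
    pvTokOf (c :: rest) = pvSingle c :: pvTokOf rest := by
  rw [pvTokOf, dif_neg h]


theorem pvTokA_eq (cs : List Char) (cur : List String) (chains : List (List String)) :
    (cur ≠ [] ∨ (pvSplitC cs).headI ≠ []) →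
    (∀ p ∈ (pvSplitC cs).tail, p ≠ []) →
    pvTokA cs cur chains =
      chains ++ ((cur ++ pvTokOf (pvSplitC cs).headI) :: (pvSplitC cs).tail.map pvTokOf) := by
  induction cs, cur, chains using pvTokA.induct with
  | case1 cs cur chains hm ih =>
    intro H1 H2
    obtain ⟨t, ht⟩ := List.isPrefixOf_iff_prefix.mp hm
    have hdrop : cs.drop 6 = t := by rw [← ht]; simp
    have hsplit : pvSplitC cs =
        (['<','m','a','s','k','>'] ++ (pvSplitC (cs.drop 6)).headI) :: (pvSplitC (cs.drop 6)).tail := by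
      rw [hdrop, ← ht]
      exact pvSplitC_nocolon_append _ t (by intro c hc; fin_cases hc <;> decide)
    rw [hsplit] at H1 H2 ⊢
    simp only [List.headI_cons, List.tail_cons] at H1 H2 ⊢
    rw [pvTokA, dif_pos hm]
    have htok : pvTokOf (['<','m','a','s','k','>'] ++ (pvSplitC (cs.drop 6)).headI) =
        "<mask>" :: pvTokOf (pvSplitC (cs.drop 6)).headI := by
      rw [pvTokOf_mask _ (List.isPrefixOf_iff_prefix.mpr ⟨(pvSplitC (cs.drop 6)).headI, rfl⟩)]
      simp
    rw [htok]
    rw [ih (by simp) (by simpa using H2)]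
    simp
  | case2 chains hm =>
    intro H1 H2
    rcases H1 with h | h
    · exact absurd rfl h
    · simp [pvSplitC] at h
  | case3 cur chains hm hcur =>
    intro H1 H2
    rw [pvTokA, dif_neg hm]
    simp only [if_neg hcur]
    rw [show pvTokOf (pvSplitC []).headI = [] by rw [pvSplitC]; simp; rw [pvTokOf]; simp [List.isPrefixOf]]
    simp [pvSplitC]
  | case4 chains rest hm =>
    intro H1 H2
    have hsp : pvSplitC (':' :: rest) = [] :: pvSplitC rest := by
      simp [pvSplitC]
    rw [hsp] at H1
    rcases H1 with h | h
    · exact absurd rfl h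
    · simp at h
  | case5 cur chains rest hcur hm ih =>
    intro H1 H2
    have hsp : pvSplitC (':' :: rest) = [] :: pvSplitC rest := by
      simp [pvSplitC]
    rw [hsp] at H2 ⊢
    simp only [List.tail_cons, List.headI_cons] at H2 ⊢
    rcases hr : pvSplitC rest with _ | ⟨p, ps⟩
    · exact absurd hr (pvSplitC_ne_nil rest)
    · have hH1 : ([] : List String) ≠ [] ∨ (pvSplitC rest).headI ≠ [] := by
        rw [hr]
        exact Or.inr (H2 p (by rw [hr]; exact List.mem_cons_self ..))
      have hH2 : ∀ q ∈ (pvSplitC rest).tail, q ≠ [] := by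
        intro q hq
        exact H2 q (List.mem_of_mem_tail hq)
      rw [pvTokA, dif_neg hm]
      dsimp only
      rw [if_pos rfl, if_neg hcur]
      rw [ih hH1 hH2, hr]
      have ht0 : pvTokOf ([] : List Char) = [] := by
        rw [pvTokOf]; simp [List.isPrefixOf]
      simp [ht0]
  | case6 cur chains c rest hm hc ih =>
    intro H1 H2
    have hne := pvSplitC_ne_nil rest
    rcases hr : pvSplitC rest with _ | ⟨p, ps⟩
    · exact absurd hr hne
    · have hsp : pvSplitC (c :: rest) = (c :: p) :: ps := by
        simp only [pvSplitC, if_neg hc, hr]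
      rw [hsp] at H2 ⊢
      simp only [List.tail_cons, List.headI_cons] at H2 ⊢
      rw [pvTokA, dif_neg hm]
      dsimp only
      rw [if_neg hc]
      have hpre : (c :: p) <+: (c :: rest) := by
        have := pvSplitC_head_prefix rest
        rw [hr] at this
        simpa using this
      have hnotm : ¬ ['<','m','a','s','k','>'].isPrefixOf (c :: p) = true := by
        intro hmp
        exact hm (List.isPrefixOf_iff_prefix.mpr
          ((List.isPrefixOf_iff_prefix.mp hmp).trans hpre))
      rw [pvTokOf_char c p hnotm]
      rw [ih (by simp) (by rw [hr]; simpa using H2)]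
      rw [hr]
      simp [pvSingle]

-- ===== VERDICT (by name: the statement is the Claim_ definition above) =====
theorem tokenize_raw_sequence_py_spec : Claim_equal_tokenize_raw_sequence_py := by
  intro seq hD hP
  unfold Spec_tokenize_raw_sequence_py tokenize_raw_sequence_py tokenize_raw_sequence_py_alt
  unfold Pre_tokenize_raw_sequence_py at hP
  rw [pv_splitOn_colon] at hP
  simp only [pv_splitOn_colon]
  have hany : (pvSplitC seq.toList).any (· = []) = false := by
    simp only [List.any_eq_false, decide_eq_true_eq]
    exact hP
  rcases hq : pvSplitC seq.toList with _ | ⟨p, ps⟩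
  · exact absurd hq (pvSplitC_ne_nil _)
  · have hH1 : ([] : List String) ≠ [] ∨ (pvSplitC seq.toList).headI ≠ [] := by
      rw [hq]
      exact Or.inr (hP p (hq ▸ List.mem_cons_self ..))
    have hH2 : ∀ q ∈ (pvSplitC seq.toList).tail, q ≠ [] := fun q hqq => hP q (List.mem_of_mem_tail hqq)
    rw [pvTokA_eq seq.toList [] [] hH1 hH2, hq]
    rw [hq] at hany
    simp [hany, pv_chainTok_eq]
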